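-- pv_equiv track=rewrite | github.com/rudygl/proyecto-2-la-tercera-es-la-vencida | dominio_ag_tsp.py | cruzar
-- ===== SOURCE A (Python) =====
-- def cruzar(sol_a, sol_b):
--     """Produce una nueva posible solución cruzando las dos soluciones dadas por parámetro.
--
--     Entradas:
--     sol_a (estructura de datos)
--         Estructura de datos que modela la solución antecesora A que será cruzada con la B
--
--     sol_b (estructura de datos)
--         Estructura de datos que modela la solución antecesora B que será cruzada con la A
--
--     Salidas:
--     (estructura de datos) Una nueva solución producto del cruzamiento entre las soluciones A y B
--     """
--     hijo = []
--     n = len(sol_a)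
--
--     while(n>0):
--
--         hijo+=[sol_a[n-1]]
--         hijo+=[sol_b[n-1]]
--         n-=1
--
--
--     bandera = 0
--     n=len(hijo)
--     resultado = []
--
--     for x in range (0, n):
--         j=x+1
--         while(j< n):
--
--             if(hijo[j]==hijo[x]):
--
--                 j = n
--                 bandera = 1
--             else:
--
--                 j+=1
--         if(bandera == 1):
--             bandera = 0
--
--         else:
--
--             resultado += [hijo[x]]
--
--     return resultado
--     # Pendiente: implementar este método
--     pass
-- ===== SOURCE B (Python) =====
-- def cruzar(sol_a, sol_b):
--     n = len(sol_a)
--     hijo = [v for i in reversed(range(n)) for v in (sol_a[i], sol_b[i])]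
--     seen = set()
--     out = []
--     for v in reversed(hijo):
--         if v not in seen:
--             seen.add(v)
--             out.append(v)
--     out.reverse()
--     return out
-- ===== Notes on version B (the rewrite author's own statement) =====
-- stated objective: faster
-- what changed: replaces the quadratic per-element forward duplicate scan with a single reverse pass over the interleaved list keeping a set of values already seen later (keep-last-occurrence dedup in one pass)
import Mathlib
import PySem

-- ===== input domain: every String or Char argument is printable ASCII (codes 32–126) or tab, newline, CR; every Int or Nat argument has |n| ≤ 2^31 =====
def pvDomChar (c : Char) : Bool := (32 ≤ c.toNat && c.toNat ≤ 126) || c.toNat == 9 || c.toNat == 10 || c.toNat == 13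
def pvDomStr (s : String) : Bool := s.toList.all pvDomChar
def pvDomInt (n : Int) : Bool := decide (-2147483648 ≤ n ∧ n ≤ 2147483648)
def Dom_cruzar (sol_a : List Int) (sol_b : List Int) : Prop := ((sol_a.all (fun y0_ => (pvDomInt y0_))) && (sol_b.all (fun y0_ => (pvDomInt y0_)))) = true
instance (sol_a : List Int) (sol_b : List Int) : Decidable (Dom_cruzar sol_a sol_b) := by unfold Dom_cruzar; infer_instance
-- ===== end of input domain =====

-- B replaces A's quadratic forward duplicate scan by a single reverse pass with a set of values seen later (same return value).
-- ===== PORT A =====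
-- the first while loop: hijo = [sol_a[n-1], sol_b[n-1]] appended for n = len(sol_a) down to 1
def pvBuildA (a b : List Int) : Nat → List Int
  | 0 => []
  | Nat.succ m => PySem.List.pyGetD a (m : Int) 0 :: PySem.List.pyGetD b (m : Int) 0 :: pvBuildA a b m

-- inner 'while j < n' scan with early exit (bandera)
def pvScan (h : List Int) (v : Int) (j n : Nat) : Bool :=
  if _hj : j < n then
    if PySem.List.pyGetD h (j : Int) 0 = v then true else pvScan h v (j + 1) n
  else false
  termination_by n - j

-- 'for x in range(0, n)' building resultado
def pvOuter (h : List Int) (n x : Nat) : List Int :=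
  if _hx : x < n then
    if pvScan h (PySem.List.pyGetD h (x : Int) 0) (x + 1) n then pvOuter h n (x + 1)
    else PySem.List.pyGetD h (x : Int) 0 :: pvOuter h n (x + 1)
  else []
  termination_by n - x

def cruzar (sol_a : List Int) (sol_b : List Int) : List Int :=
  let hijo := pvBuildA sol_a sol_b sol_a.length
  pvOuter hijo hijo.length 0

-- ===== PORT B =====
-- 'for v in reversed(hijo): if v not in seen: seen.add(v); out.append(v)'
def pvRevPass (l : List Int) (seen : PySem.Set Int) (out : List Int) : List Int :=
  match l with
  | [] => out
  | v :: t =>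
    if PySem.Set.contains seen v then pvRevPass t seen out
    else pvRevPass t (PySem.Set.add seen v) (out ++ [v])

def cruzar_alt (sol_a : List Int) (sol_b : List Int) : List Int :=
  let n := sol_a.length
  let hijo := ((List.range n).reverse).flatMap
    (fun i => [PySem.List.pyGetD sol_a (i : Int) 0, PySem.List.pyGetD sol_b (i : Int) 0])
  (pvRevPass hijo.reverse PySem.Set.empty []).reverse

-- ===== PRECONDITION & SPEC =====
-- Pre_ excludes inputs with len(sol_b) < len(sol_a), on which Python A raises IndexError (sol_b[n-1]).
def Pre_cruzar (sol_a : List Int) (sol_b : List Int) : Prop := sol_a.length ≤ sol_b.length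
instance (sol_a : List Int) (sol_b : List Int) : Decidable (Pre_cruzar sol_a sol_b) := by
  unfold Pre_cruzar; infer_instance
def pvWitness_cruzar : List Int × List Int := ([1, 2, 1], [3, 2, 4])
def Spec_cruzar (sol_a : List Int) (sol_b : List Int) (out : List Int) : Prop := out = cruzar_alt sol_a sol_b
instance (sol_a : List Int) (sol_b : List Int) (out : List Int) : Decidable (Spec_cruzar sol_a sol_b out) := by unfold Spec_cruzar; infer_instance

-- ===== CLAIM (what is proved, stated in full; the proofs are below) =====
def Claim_equal_cruzar : Prop := ∀ (sol_a : List Int) (sol_b : List Int), Dom_cruzar sol_a sol_b → Pre_cruzar sol_a sol_b → Spec_cruzar sol_a sol_b (cruzar sol_a sol_b)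

-- ===== LEMMAS AND PROOFS =====

-- common specification: keep an element iff its value occurs neither later in the list nor in s
def pvKeepF : List Int → List Int → List Int
  | [], _ => []
  | v :: t, s => if v ∈ t ∨ v ∈ s then pvKeepF t s else v :: pvKeepF t s

lemma pvBuildA_eq (a b : List Int) (n : Nat) :
    pvBuildA a b n = ((List.range n).reverse).flatMap
      (fun i => [PySem.List.pyGetD a (i : Int) 0, PySem.List.pyGetD b (i : Int) 0]) := by
  induction n with
  | zero => rfl
  | succ m ih => simp [pvBuildA, List.range_succ, ih]

lemma pvScan_eq_aux (h : List Int) (v : Int) (d : Nat) :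
    ∀ j, h.length - j ≤ d → pvScan h v j h.length = decide (v ∈ h.drop j) := by
  induction d with
  | zero =>
    intro j hle
    have hj : ¬ j < h.length := by omega
    rw [pvScan]
    simp [hj, List.drop_eq_nil_of_le (by omega : h.length ≤ j)]
  | succ d ih =>
    intro j hle
    rw [pvScan]
    by_cases hj : j < h.length
    · have hdrop : h.drop j = h[j] :: h.drop (j + 1) := List.drop_eq_getElem_cons hj
      have hget : PySem.List.pyGetD h (j : Int) 0 = h[j] := by
        simp [PySem.List.pyGetD_natCast, List.getD_eq_getElem?_getD, hj]
      rw [dif_pos hj, hget, ih (j + 1) (by omega), hdrop]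
      by_cases heq : h[j] = v
      · simp [heq]
      · rw [if_neg heq]
        simp only [List.mem_cons, decide_eq_decide]
        constructor
        · exact Or.inr
        · rintro (h1 | h1)
          · exact absurd h1.symm heq
          · exact h1
    · rw [dif_neg hj]
      simp [List.drop_eq_nil_of_le (by omega : h.length ≤ j)]

lemma pvScan_eq (h : List Int) (v : Int) (j : Nat) :
    pvScan h v j h.length = decide (v ∈ h.drop j) :=
  pvScan_eq_aux h v (h.length - j) j le_rfl

lemma pvOuter_eq_aux (h : List Int) (d : Nat) :
    ∀ x, h.length - x ≤ d → pvOuter h h.length x = pvKeepF (h.drop x) [] := by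
  induction d with
  | zero =>
    intro x hle
    have hx : ¬ x < h.length := by omega
    rw [pvOuter]
    simp [hx, List.drop_eq_nil_of_le (by omega : h.length ≤ x), pvKeepF]
  | succ d ih =>
    intro x hle
    rw [pvOuter]
    by_cases hx : x < h.length
    · have hdrop : h.drop x = h[x] :: h.drop (x + 1) := List.drop_eq_getElem_cons hx
      have hget : PySem.List.pyGetD h (x : Int) 0 = h[x] := by
        simp [PySem.List.pyGetD_natCast, List.getD_eq_getElem?_getD, hx]
      rw [dif_pos hx, hget, pvScan_eq, ih (x + 1) (by omega), hdrop]
      by_cases hmem : h[x] ∈ h.drop (x + 1)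
      · rw [if_pos (by simpa using hmem)]
        simp only [pvKeepF]
        rw [if_pos (Or.inl hmem)]
      · rw [if_neg (by simpa using hmem)]
        simp only [pvKeepF]
        rw [if_neg (by simp [hmem])]
    · rw [dif_neg hx]
      simp [List.drop_eq_nil_of_le (by omega : h.length ≤ x), pvKeepF]

lemma pvOuter_eq (h : List Int) (x : Nat) :
    pvOuter h h.length x = pvKeepF (h.drop x) [] :=
  pvOuter_eq_aux h (h.length - x) x le_rfl

lemma pvRevPass_acc (l : List Int) (s : PySem.Set Int) (out : List Int) :
    pvRevPass l s out = out ++ pvRevPass l s [] := by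
  induction l generalizing s out with
  | nil => simp [pvRevPass]
  | cons v t ih =>
    rw [pvRevPass, pvRevPass]
    by_cases hc : PySem.Set.contains s v = true
    · rw [if_pos hc, if_pos hc, ih s out]
    · rw [if_neg hc, if_neg hc, ih (PySem.Set.add s v) (out ++ [v]),
        ih (PySem.Set.add s v) ([] ++ [v])]
      simp

lemma pvKeepF_append_singleton (u : List Int) (v : Int) (s : List Int) :
    pvKeepF (u ++ [v]) s =
      if v ∈ s then pvKeepF u s else pvKeepF u (s ++ [v]) ++ [v] := by
  induction u generalizing s with
  | nil =>
    by_cases hv : v ∈ s <;> simp [pvKeepF, hv]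
  | cons w u' ih =>
    rw [List.cons_append]
    simp only [pvKeepF]
    rw [ih]
    by_cases hv : v ∈ s
    · rw [if_pos hv, if_pos hv]
      have hiff : (w ∈ u' ++ [v] ∨ w ∈ s) ↔ (w ∈ u' ∨ w ∈ s) := by
        simp only [List.mem_append, List.mem_singleton]
        by_cases hwv : w = v
        · subst hwv; tauto
        · tauto
      rw [if_congr hiff rfl rfl]
    · rw [if_neg hv, if_neg hv]
      have hiff : (w ∈ u' ++ [v] ∨ w ∈ s) ↔ (w ∈ u' ∨ w ∈ s ++ [v]) := by
        simp only [List.mem_append, List.mem_singleton]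
        tauto
      by_cases hC : w ∈ u' ∨ w ∈ s ++ [v]
      · rw [if_pos (hiff.mpr hC), if_pos hC]
      · rw [if_neg (fun h => hC (hiff.mp h)), if_neg hC, List.cons_append]

lemma pvRevPass_eq (l : List Int) (s : PySem.Set Int) :
    (pvRevPass l s []).reverse = pvKeepF l.reverse s := by
  induction l generalizing s with
  | nil => simp [pvRevPass, pvKeepF]
  | cons v t ih =>
    rw [List.reverse_cons, pvKeepF_append_singleton, pvRevPass]
    by_cases hm : v ∈ s
    · rw [if_pos ((PySem.Set.contains_iff s v).mpr hm), if_pos hm, ih]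
    · have hc : ¬ PySem.Set.contains s v = true := fun h =>
        hm ((PySem.Set.contains_iff s v).mp h)
      rw [if_neg hc, if_neg hm, PySem.Set.add_of_not_mem hm, pvRevPass_acc]
      simp [ih]

-- ===== VERDICT (by name: the statement is the Claim_ definition above) =====
theorem cruzar_spec : Claim_equal_cruzar := by
  intro sol_a sol_b _ _
  unfold Spec_cruzar cruzar cruzar_alt
  rw [pvBuildA_eq, pvOuter_eq, pvRevPass_eq, List.reverse_reverse, List.drop_zero]
  rfl
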